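-- pv_equiv track=rewrite | github.com/HiringBaseRepo/HiringBase_Server | app/ai/matcher/semantic_matcher.py | _exact_and_synonym_match
-- ===== SOURCE A (Python) =====
-- from typing import Any, Dict, List, Optional
--
-- def _exact_and_synonym_match(
--     skill: str,
--     candidate_skills: set[str],
--     synonyms: Dict[str, List[str]],
-- ) -> bool:
--     """Cek exact match + synonym match."""
--     if skill in candidate_skills:
--         return True
--
--     # Cek apakah skill ada di synonym groups
--     for key, syns in synonyms.items():
--         group = {key} | set(syns)
--         if skill in group:
--             # Cek apakah kandidat punya salah satu dari group
--             if candidate_skills & group: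
--                 return True
--
--     return False
-- ===== SOURCE B (Python) =====
-- from typing import Dict, List
--
--
-- def _exact_and_synonym_match(
--     skill: str,
--     candidate_skills: set[str],
--     synonyms: Dict[str, List[str]],
-- ) -> bool:
--     """Inverted index: map each word to the set of ids of the synonym
--     groups containing it; then skill and a candidate match iff their
--     id-sets intersect."""
--     if skill in candidate_skills:
--         return True
--     index: Dict[str, set] = {}
--     for i, (key, syns) in enumerate(synonyms.items()):
--         for w in [key, *syns]:
--             index.setdefault(w, set()).add(i)
--     skill_groups = index.get(skill, set())
--     if not skill_groups:
--         return False
--     return any(index.get(c, set()) & skill_groups for c in candidate_skills)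
-- ===== Notes on version B (the rewrite author's own statement) =====
-- stated objective: alternative
-- what changed: B builds an inverted index (word -> set of synonym-group ids) in one pass and answers by intersecting the id-sets of the skill and each candidate, instead of A's per-group membership-plus-intersection scan with early return.
import Mathlib
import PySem

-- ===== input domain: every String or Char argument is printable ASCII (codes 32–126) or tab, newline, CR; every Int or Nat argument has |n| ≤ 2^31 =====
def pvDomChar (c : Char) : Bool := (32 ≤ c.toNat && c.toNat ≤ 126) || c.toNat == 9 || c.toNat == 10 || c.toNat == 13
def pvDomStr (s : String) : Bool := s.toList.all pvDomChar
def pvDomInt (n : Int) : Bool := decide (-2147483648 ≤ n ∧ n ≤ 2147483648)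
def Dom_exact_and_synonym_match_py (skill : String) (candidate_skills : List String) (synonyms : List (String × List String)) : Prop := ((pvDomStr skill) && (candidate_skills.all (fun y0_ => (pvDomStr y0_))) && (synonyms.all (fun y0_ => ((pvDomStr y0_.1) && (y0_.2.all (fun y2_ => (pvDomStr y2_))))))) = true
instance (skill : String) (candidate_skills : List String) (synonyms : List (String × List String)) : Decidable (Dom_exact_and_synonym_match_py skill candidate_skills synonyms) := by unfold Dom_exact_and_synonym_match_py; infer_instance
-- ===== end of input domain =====

-- B replaces A's scan of the groups (per-group intersection, early return) by an inverted index
-- word -> set of group ids built once, then one lookup per candidate (objective: alternative).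

-- ===== PORT A =====
-- the for-loop with its early returns, as structural recursion over the synonym items
def pvALoop (skill : String) (candidate_skills : List String) : List (String × List String) → Bool
  | [] => false
  | (key, syns) :: rest =>
    let group := PySem.Set.union (PySem.Set.ofList [key]) syns   -- {key} | set(syns)
    if PySem.Set.contains group skill then
      if !(PySem.Set.inter candidate_skills group).isEmpty then true
      else pvALoop skill candidate_skills rest
    else pvALoop skill candidate_skills rest

def exact_and_synonym_match_py (skill : String) (candidate_skills : List String) (synonyms : List (String × List String)) : Bool :=
  if PySem.Set.contains candidate_skills skill then true
  else pvALoop skill candidate_skills synonyms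

-- ===== PORT B =====
-- index.setdefault(w, set()).add(i)  (value-wise: store f(current value), default empty set)
def pvIndexAdd (i : Int) (d : PySem.Dict String (PySem.Set Int)) (w : String) : PySem.Dict String (PySem.Set Int) :=
  d.modify w PySem.Set.empty (fun s => PySem.Set.add s i)

-- for i, (key, syns) in enumerate(synonyms.items()): for w in [key, *syns]: ...
def pvBuildIndex (synonyms : List (String × List String)) : PySem.Dict String (PySem.Set Int) :=
  (PySem.List.enumerate synonyms 0).foldl
    (fun d ip => (ip.2.1 :: ip.2.2).foldl (pvIndexAdd ip.1) d) PySem.Dict.empty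

def exact_and_synonym_match_py_alt (skill : String) (candidate_skills : List String) (synonyms : List (String × List String)) : Bool :=
  if PySem.Set.contains candidate_skills skill then true
  else
    let index := pvBuildIndex synonyms
    let skill_groups := index.getD skill PySem.Set.empty
    if skill_groups.isEmpty then false
    else candidate_skills.any (fun c => !(PySem.Set.inter (index.getD c PySem.Set.empty) skill_groups).isEmpty)

-- ===== PRECONDITION & SPEC =====
def Spec_exact_and_synonym_match_py (skill : String) (candidate_skills : List String) (synonyms : List (String × List String)) (out : Bool) : Prop := out = exact_and_synonym_match_py_alt skill candidate_skills synonyms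
instance (skill : String) (candidate_skills : List String) (synonyms : List (String × List String)) (out : Bool) : Decidable (Spec_exact_and_synonym_match_py skill candidate_skills synonyms out) := by unfold Spec_exact_and_synonym_match_py; infer_instance

-- ===== CLAIM (what is proved, stated in full; the proofs are below) =====
def Claim_equal_exact_and_synonym_match_py : Prop := ∀ (skill : String) (candidate_skills : List String) (synonyms : List (String × List String)), Dom_exact_and_synonym_match_py skill candidate_skills synonyms → Spec_exact_and_synonym_match_py skill candidate_skills synonyms (exact_and_synonym_match_py skill candidate_skills synonyms)

-- ===== LEMMAS AND PROOFS =====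

-- A's loop is true iff some group contains skill and a candidate
theorem pvALoop_iff (skill : String) (cs : List String) (l : List (String × List String)) :
    pvALoop skill cs l = true ↔
      ∃ p ∈ l, skill ∈ p.1 :: p.2 ∧ ∃ c ∈ cs, c ∈ p.1 :: p.2 := by
  induction l with
  | nil => simp [pvALoop]
  | cons kv rest ih =>
    obtain ⟨key, syns⟩ := kv
    simp only [pvALoop]
    by_cases hsk : PySem.Set.contains (PySem.Set.union (PySem.Set.ofList [key]) syns) skill = true
    · have hsk' : skill ∈ key :: syns := by
        have := (PySem.Set.contains_iff _ _).mp hsk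
        simp only [PySem.Set.mem_union, PySem.Set.mem_ofList, List.mem_singleton] at this
        simpa using this
      rw [if_pos hsk]
      by_cases hin : (!(PySem.Set.inter cs (PySem.Set.union (PySem.Set.ofList [key]) syns)).isEmpty) = true
      · rw [if_pos hin]
        simp only [List.isEmpty_eq_false_iff, Bool.not_eq_true', ne_eq,
          List.eq_nil_iff_forall_not_mem, not_forall, not_not] at hin
        obtain ⟨c, hc⟩ := hin
        rw [PySem.Set.mem_inter] at hc
        simp only [PySem.Set.mem_union, PySem.Set.mem_ofList, List.mem_singleton] at hc
        constructor
        · intro _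
          exact ⟨(key, syns), List.mem_cons_self .., hsk', c, hc.1, by simpa using hc.2⟩
        · intro _; rfl
      · rw [if_neg hin, ih]
        simp only [Bool.not_eq_true', Bool.not_eq_false, List.isEmpty_iff,
          List.eq_nil_iff_forall_not_mem] at hin
        constructor
        · rintro ⟨p, hp, h1, h2⟩; exact ⟨p, List.mem_cons_of_mem _ hp, h1, h2⟩
        · rintro ⟨p, hp, h1, c, hc, h2⟩
          rcases List.mem_cons.mp hp with rfl | hp'
          · exact absurd ((PySem.Set.mem_inter _ _ _).mpr ⟨hc, by
              simp only [PySem.Set.mem_union, PySem.Set.mem_ofList, List.mem_singleton]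
              simpa using h2⟩) (hin c)
          · exact ⟨p, hp', h1, c, hc, h2⟩
    · rw [if_neg hsk, ih]
      have hsk' : skill ∉ key :: syns := by
        intro h
        apply hsk
        rw [PySem.Set.contains_iff]
        simp only [PySem.Set.mem_union, PySem.Set.mem_ofList, List.mem_singleton]
        simpa using h
      constructor
      · rintro ⟨p, hp, h1, h2⟩; exact ⟨p, List.mem_cons_of_mem _ hp, h1, h2⟩
      · rintro ⟨p, hp, h1, h2⟩
        rcases List.mem_cons.mp hp with rfl | hp'
        · exact absurd h1 hsk'
        · exact ⟨p, hp', h1, h2⟩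

-- inner word loop of the index build
theorem pvInner_getD (i : Int) (ws : List String) (d : PySem.Dict String (PySem.Set Int))
    (w : String) (j : Int) :
    j ∈ (ws.foldl (pvIndexAdd i) d).getD w PySem.Set.empty ↔
      j ∈ d.getD w PySem.Set.empty ∨ (j = i ∧ w ∈ ws) := by
  induction ws generalizing d with
  | nil => simp
  | cons x xs ih =>
    simp only [List.foldl_cons, ih, pvIndexAdd]
    rw [PySem.Dict.getD_modify]
    by_cases hw : w = x
    · subst hw
      simp [PySem.Set.mem_add]
      tauto
    · rw [if_neg hw]
      simp only [List.mem_cons]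
      tauto

-- outer loop: membership in the finished index
theorem pvIndex_getD (l : List (Int × (String × List String)))
    (d : PySem.Dict String (PySem.Set Int)) (w : String) (j : Int) :
    j ∈ (l.foldl (fun d ip => (ip.2.1 :: ip.2.2).foldl (pvIndexAdd ip.1) d) d).getD w PySem.Set.empty ↔
      j ∈ d.getD w PySem.Set.empty ∨ ∃ p, (j, p) ∈ l ∧ w ∈ p.1 :: p.2 := by
  induction l generalizing d with
  | nil => simp
  | cons ip rest ih =>
    rw [List.foldl_cons, ih, pvInner_getD]
    constructor
    · rintro ((h | ⟨rfl, hw⟩) | ⟨p, hp, hw⟩)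
      · exact Or.inl h
      · exact Or.inr ⟨ip.2, by simp, hw⟩
      · exact Or.inr ⟨p, List.mem_cons_of_mem _ hp, hw⟩
    · rintro (h | ⟨p, hp, hw⟩)
      · exact Or.inl (Or.inl h)
      · rcases List.mem_cons.mp hp with heq | hp'
        · refine Or.inl (Or.inr ⟨?_, ?_⟩)
          · exact congrArg Prod.fst heq
          · have : p = ip.2 := congrArg Prod.snd heq
            rw [← this]; exact hw
        · exact Or.inr ⟨p, hp', hw⟩

theorem pvBuildIndex_getD (synonyms : List (String × List String)) (w : String) (j : Int) :
    j ∈ (pvBuildIndex synonyms).getD w PySem.Set.empty ↔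
      ∃ p, (j, p) ∈ PySem.List.enumerate synonyms 0 ∧ w ∈ p.1 :: p.2 := by
  unfold pvBuildIndex
  rw [pvIndex_getD]
  simp [PySem.Dict.getD_empty, PySem.Set.empty]

-- a shared id in the index means a shared group (enumerate ids are keys)
theorem pv_shared_id (synonyms : List (String × List String)) (skill c : String) :
    (∃ j : Int, j ∈ (pvBuildIndex synonyms).getD c PySem.Set.empty ∧
        j ∈ (pvBuildIndex synonyms).getD skill PySem.Set.empty) ↔
      ∃ p ∈ synonyms, skill ∈ p.1 :: p.2 ∧ c ∈ p.1 :: p.2 := by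
  constructor
  · rintro ⟨j, hc, hs⟩
    rw [pvBuildIndex_getD] at hc hs
    obtain ⟨p, hp, hw⟩ := hc
    obtain ⟨q, hq, hw'⟩ := hs
    rw [PySem.List.mem_enumerate_iff] at hp hq
    obtain ⟨k, hk, hpk⟩ := hp
    obtain ⟨k', hk', hqk⟩ := hq
    have hkk : k = k' := by
      have h1 : (0 : Int) + k = j := (congrArg Prod.fst hpk.symm)
      have h2 : (0 : Int) + k' = j := (congrArg Prod.fst hqk.symm)
      omega
    subst hkk
    have hpq : p = q := by
      have h1 : p = synonyms[k] := congrArg Prod.snd hpk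
      have h2 : q = synonyms[k] := congrArg Prod.snd hqk
      rw [h1, h2]
    subst hpq
    have : p = synonyms[k] := congrArg Prod.snd hpk
    exact ⟨p, this ▸ List.getElem_mem hk, hw', hw⟩
  · rintro ⟨p, hp, hs, hc⟩
    obtain ⟨k, hk, hpk⟩ := List.getElem_of_mem hp
    refine ⟨(k : Int), ?_, ?_⟩ <;>
    · rw [pvBuildIndex_getD]
      exact ⟨p, (PySem.List.mem_enumerate_iff _ _ _).mpr ⟨k, hk, by simp [hpk]⟩, by assumption⟩

-- B is true iff skill is a candidate, or some group contains skill and a candidate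
theorem pvB_iff (skill : String) (cs : List String) (syns : List (String × List String)) :
    exact_and_synonym_match_py_alt skill cs syns = true ↔
      skill ∈ cs ∨ ∃ p ∈ syns, skill ∈ p.1 :: p.2 ∧ ∃ c ∈ cs, c ∈ p.1 :: p.2 := by
  unfold exact_and_synonym_match_py_alt
  by_cases hm : PySem.Set.contains cs skill = true
  · simp [hm, (PySem.Set.contains_iff _ _).mp hm]
  · rw [if_neg hm]
    have hm' : skill ∉ cs := fun h => hm ((PySem.Set.contains_iff _ _).mpr h)
    simp only [hm', false_or]
    have key : ∀ b : Bool,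
        (b = true ↔ ∃ c ∈ cs, ∃ j : Int,
            j ∈ (pvBuildIndex syns).getD c PySem.Set.empty ∧
            j ∈ (pvBuildIndex syns).getD skill PySem.Set.empty) →
        (b = true ↔ ∃ p ∈ syns, skill ∈ p.1 :: p.2 ∧ ∃ c ∈ cs, c ∈ p.1 :: p.2) := by
      intro b hb
      rw [hb]
      constructor
      · rintro ⟨c, hc, hj⟩
        obtain ⟨p, hp, h1, h2⟩ := (pv_shared_id syns skill c).mp hj
        exact ⟨p, hp, h1, c, hc, h2⟩
      · rintro ⟨p, hp, h1, c, hc, h2⟩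
        exact ⟨c, hc, (pv_shared_id syns skill c).mpr ⟨p, hp, h1, h2⟩⟩
    by_cases he : ((pvBuildIndex syns).getD skill PySem.Set.empty).isEmpty = true
    · rw [if_pos he]
      apply key
      constructor
      · intro h; exact absurd h (by simp)
      · rintro ⟨c, _, j, _, hj⟩
        rw [List.isEmpty_iff] at he
        rw [he] at hj
        simp at hj
    · rw [if_neg he]
      apply key
      simp only [List.any_eq_true, Bool.not_eq_true', List.isEmpty_eq_false_iff, ne_eq,
        List.eq_nil_iff_forall_not_mem, not_forall, not_not]
      constructor
      · rintro ⟨c, hc, j, hj⟩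
        rw [PySem.Set.mem_inter] at hj
        exact ⟨c, hc, j, hj.1, hj.2⟩
      · rintro ⟨c, hc, j, h1, h2⟩
        exact ⟨c, hc, j, (PySem.Set.mem_inter _ _ _).mpr ⟨h1, h2⟩⟩

-- ===== VERDICT (by name: the statement is the Claim_ definition above) =====
theorem exact_and_synonym_match_py_spec : Claim_equal_exact_and_synonym_match_py := by
  intro skill cs syns _
  unfold Spec_exact_and_synonym_match_py
  have hA : exact_and_synonym_match_py skill cs syns = true ↔
      skill ∈ cs ∨ ∃ p ∈ syns, skill ∈ p.1 :: p.2 ∧ ∃ c ∈ cs, c ∈ p.1 :: p.2 := by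
    unfold exact_and_synonym_match_py
    by_cases hm : PySem.Set.contains cs skill = true
    · simp [hm, (PySem.Set.contains_iff _ _).mp hm]
    · rw [if_neg hm, pvALoop_iff]
      have hm' : skill ∉ cs := fun h => hm ((PySem.Set.contains_iff _ _).mpr h)
      simp [hm']
  rw [Bool.eq_iff_iff, hA, pvB_iff]
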